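-- pv_equiv track=rewrite | github.com/pcorliss/advent_of_code | 2024/15/daily.py | parse_part_2
-- ===== SOURCE A (Python) =====
-- def parse_part_2(input_text):
--   grid = []
--   moves = []
--   pos = None
--
--   grid_fill = True
--   for line in input_text.strip().split('\n'):
--     if len(line) == 0:
--       if grid != []:
--         grid_fill = False
--       continue
--
--     if grid_fill:
--       grid_line = []
--       for idx in range(len(line)):
--         if line[idx] == '@':
--           pos = (idx * 2, len(grid))
--           grid_line.append('.')
--           grid_line.append('.')
--         elif line[idx] == '.':
--           grid_line.append('.')
--           grid_line.append('.')
--         elif line[idx] == '#':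
--           grid_line.append('#')
--           grid_line.append('#')
--         elif line[idx] == 'O':
--           grid_line.append('[')
--           grid_line.append(']')
--         else:
--           raise(f"Unknown Char {line[idx]}")
--
--       grid.append(grid_line)
--
--
--     else:
--       moves += list(line)
--
--
--   return (grid, moves, pos)
-- ===== SOURCE B (Python) =====
-- def parse_part_2(input_text):
--   lines = input_text.strip().split('\n')
--   # split into sections by index: skip leading blank lines, then the
--   # contiguous nonempty run is the grid section, the rest holds the moves
--   i = 0
--   while i < len(lines) and lines[i] == '':
--     i += 1
--   j = i
--   while j < len(lines) and lines[j] != '':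
--     j += 1
--   grid_lines = lines[i:j]
--
--   exp = {'@': ['.', '.'], '.': ['.', '.'], '#': ['#', '#'], 'O': ['[', ']']}
--   grid = [[half for c in line for half in exp[c]] for line in grid_lines]
--
--   ats = [(x * 2, y) for y, line in enumerate(grid_lines)
--          for x, c in enumerate(line) if c == '@']
--   pos = ats[-1] if ats else None
--
--   moves = list(''.join(line for line in lines[j:] if line != ''))
--   return (grid, moves, pos)
-- ===== Notes on version B (the rewrite author's own statement) =====
-- stated objective: alternative
-- what changed: A's single pass with a grid_fill boolean state machine and an in-loop pos overwrite is replaced by an index-based section split (two while loops find the grid run) followed by independent per-section comprehensions: a dict-driven cell-doubling map, a collect-all-'@'-positions-take-last scan, and a join of the move lines.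
import Mathlib
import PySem

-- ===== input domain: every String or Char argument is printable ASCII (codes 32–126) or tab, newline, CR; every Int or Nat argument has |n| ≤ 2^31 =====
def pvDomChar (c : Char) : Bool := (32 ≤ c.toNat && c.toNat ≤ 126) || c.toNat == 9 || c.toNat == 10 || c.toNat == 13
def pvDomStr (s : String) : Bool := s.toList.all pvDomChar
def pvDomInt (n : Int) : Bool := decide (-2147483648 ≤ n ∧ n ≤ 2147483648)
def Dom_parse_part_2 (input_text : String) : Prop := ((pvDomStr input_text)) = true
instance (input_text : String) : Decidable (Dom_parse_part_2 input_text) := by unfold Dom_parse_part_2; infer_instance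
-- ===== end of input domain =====

-- B replaces A's one-pass boolean-flag state machine by an index-based section split plus
-- per-section comprehensions (dict-driven cell doubling, collect-all-'@'-take-last, joined moves);
-- same cost, different decomposition (objective: alternative).

-- ===== PORT A =====
-- Python lines are handled as List Char; a stored 1-char Python string becomes String.ofList [c].
-- inner loop 'for idx in range(len(line)): … line[idx] …' ported as a fold over the enumerated chars
def pvAChar (gy : Int) (st : List String × Option (Int × Int)) (ic : Int × Char) :
    List String × Option (Int × Int) :=
  if ic.2 = '@' then (st.1 ++ [".", "."], some (ic.1 * 2, gy))
  else if ic.2 = '.' then (st.1 ++ [".", "."], st.2)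
  else if ic.2 = '#' then (st.1 ++ ["#", "#"], st.2)
  else if ic.2 = 'O' then (st.1 ++ ["[", "]"], st.2)
  else st  -- Python raises here (TypeError from raise(f"Unknown Char …")); excluded by Pre_

def pvALoop : List (List Char) → List (List String) → List String → Option (Int × Int) → Bool →
    List (List String) × List String × Option (Int × Int)
  | [], g, m, p, _ => (g, m, p)
  | l :: rest, g, m, p, fill =>
    if l = [] then pvALoop rest g m p (if g ≠ [] then false else fill)
    else if fill then
      let r := (PySem.List.enumerate l 0).foldl (pvAChar (g.length : Int)) ([], p)
      pvALoop rest (g ++ [r.1]) m r.2 fill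
    else pvALoop rest g (m ++ l.map (fun c => String.ofList [c])) p fill

def parse_part_2 (input_text : String) : List (List String) × List String × (Option (Int × Int)) :=
  pvALoop (PySem.Chars.splitOn (PySem.Str.strip input_text).toList ['\n']) [] [] none true

-- ===== PORT B =====
-- port of Source B: the two index-scanning while loops
def pvSkipBlank : List (List Char) → Nat
  | [] => 0
  | l :: rest => if l = [] then pvSkipBlank rest + 1 else 0

def pvRunLen : List (List Char) → Nat
  | [] => 0
  | l :: rest => if l = [] then 0 else pvRunLen rest + 1

-- Source B's dict 'exp'
def pvExp : PySem.Dict String (List String) :=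
  PySem.Dict.ofList [("@", [".", "."]), (".", [".", "."]), ("#", ["#", "#"]), ("O", ["[", "]"])]

def parse_part_2_alt (input_text : String) : List (List String) × List String × (Option (Int × Int)) :=
  let lines := PySem.Chars.splitOn (PySem.Str.strip input_text).toList ['\n']
  let i := pvSkipBlank lines
  let body := lines.drop i
  let n := pvRunLen body
  let gridLines := body.take n
  -- exp[c]: the KeyError char is outside Pre_; modelled as []
  let grid := gridLines.map (fun l => l.flatMap (fun c => pvExp.getD (String.ofList [c]) []))
  let ats := (PySem.List.enumerate gridLines 0).flatMap (fun yl =>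
    (PySem.List.enumerate yl.2 0).filterMap (fun xc =>
      if xc.2 = '@' then some (xc.1 * 2, yl.1) else none))
  let pos := ats.getLast?
  let moves := ((body.drop n).filter (fun l => l != [])).flatten.map (fun c => String.ofList [c])
  (grid, moves, pos)

-- ===== PRECONDITION & SPEC =====
-- Pre_ excludes exactly the inputs on which A raises: a char other than '@' '.' '#' 'O'
-- inside the grid section (the contiguous run of nonempty lines after any leading blank lines).
def Pre_parse_part_2 (input_text : String) : Prop :=
  ((((PySem.Chars.splitOn (PySem.Str.strip input_text).toList ['\n']).dropWhile
      (fun l => l == [])).takeWhile (fun l => l != [])).all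
    (fun l => l.all (fun c => c == '@' || c == '.' || c == '#' || c == 'O'))) = true
instance (input_text : String) : Decidable (Pre_parse_part_2 input_text) := by
  unfold Pre_parse_part_2; infer_instance

def pvWitness_parse_part_2 : String := "##O@.\n#.O#\n\n<^v\n>>"

def Spec_parse_part_2 (input_text : String) (out : List (List String) × List String × (Option (Int × Int))) : Prop := out = parse_part_2_alt input_text
instance (input_text : String) (out : List (List String) × List String × (Option (Int × Int))) : Decidable (Spec_parse_part_2 input_text out) := by unfold Spec_parse_part_2; infer_instance

-- ===== CLAIM (what is proved, stated in full; the proofs are below) =====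
def Claim_equal_parse_part_2 : Prop := ∀ (input_text : String), Dom_parse_part_2 input_text → Pre_parse_part_2 input_text → Spec_parse_part_2 input_text (parse_part_2 input_text)

-- ===== LEMMAS AND PROOFS =====

def pvGood (c : Char) : Prop := c = '@' ∨ c = '.' ∨ c = '#' ∨ c = 'O'

def pvExpand (l : List Char) : List String := l.flatMap (fun c => pvExp.getD (String.ofList [c]) [])

def pvAmps (ls : List (List Char)) (y0 : Int) : List (Int × Int) :=
  (PySem.List.enumerate ls y0).flatMap (fun yl =>
    (PySem.List.enumerate yl.2 0).filterMap (fun xc =>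
      if xc.2 = '@' then some (xc.1 * 2, yl.1) else none))

theorem pvExp_at (c : Char) (h : pvGood c) :
    pvExp.getD (String.ofList [c]) [] =
      (if c = '@' then [".", "."] else if c = '.' then [".", "."]
       else if c = '#' then ["#", "#"] else ["[", "]"]) := by
  rcases h with h | h | h | h <;> subst h <;> decide

theorem pvInner (gy : Int) (l : List Char) (h : ∀ c ∈ l, pvGood c) :
    ∀ (s : Int) (gl : List String) (p0 : Option (Int × Int)),
      (PySem.List.enumerate l s).foldl (pvAChar gy) (gl, p0)
        = (gl ++ pvExpand l,
           ((PySem.List.enumerate l s).filterMap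
             (fun xc => if xc.2 = '@' then some (xc.1 * 2, gy) else none)).foldl
             (fun _ v => some v) p0) := by
  revert h
  induction l with
  | nil =>
    intro _ s gl p0
    simp [pvExpand, PySem.List.enumerate_nil]
  | cons c l ih =>
    intro h s gl p0
    have hc : pvGood c := h c (by simp)
    have ht : ∀ c' ∈ l, pvGood c' := fun c' hm => h c' (by simp [hm])
    rw [PySem.List.enumerate_cons]
    simp only [List.foldl_cons, List.filterMap_cons]
    have e := pvExp_at c hc
    rcases hc with hc | hc | hc | hc <;> subst hc <;>
      simp [pvAChar, pvExpand, ih ht, e, List.append_assoc]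

theorem pvLast {α : Type} (xs : List α) : ∀ (p0 : Option α),
    xs.foldl (fun _ v => some v) p0 = xs.getLast?.or p0 := by
  induction xs using List.reverseRecOn with
  | nil => simp
  | append_singleton xs a ih => intro p0; simp [List.foldl_append]

theorem pvMoves (ls : List (List Char)) : ∀ (g : List (List String)) (m : List String) (p : Option (Int × Int)),
    pvALoop ls g m p false
      = (g, m ++ (ls.filter (fun l => l != [])).flatten.map (fun c => String.ofList [c]), p) := by
  induction ls with
  | nil => intro g m p; simp [pvALoop]
  | cons l rest ih =>
    intro g m p
    by_cases h : l = []
    · subst h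
      simp [pvALoop, ih]
    · simp [pvALoop, h, ih]

theorem pvSkip (ls : List (List Char)) : ∀ (m : List String) (p : Option (Int × Int)),
    pvALoop ls [] m p true = pvALoop (ls.dropWhile (fun l => l == [])) [] m p true := by
  induction ls with
  | nil => intro m p; rfl
  | cons l rest ih =>
    intro m p
    by_cases h : l = []
    · subst h; simpa [pvALoop, List.dropWhile_cons] using ih m p
    · simp [h]

theorem pvGrid (ls : List (List Char)) (hne : ∀ l ∈ ls, l ≠ []) (hg : ∀ l ∈ ls, ∀ c ∈ l, pvGood c) :
    ∀ (rest : List (List Char)) (g : List (List String)) (m : List String) (p : Option (Int × Int)),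
      pvALoop (ls ++ rest) g m p true
        = pvALoop rest (g ++ ls.map pvExpand) m
            ((pvAmps ls (g.length : Int)).foldl (fun _ v => some v) p) true := by
  revert hne hg
  induction ls with
  | nil =>
    intro _ _ rest g m p
    simp [pvAmps, PySem.List.enumerate_nil]
  | cons l ls ih =>
    intro hne hg rest g m p
    have hl : l ≠ [] := hne l (by simp)
    have hgl : ∀ c ∈ l, pvGood c := hg l (by simp)
    rw [List.cons_append]
    show pvALoop (l :: (ls ++ rest)) g m p true = _
    simp only [pvALoop, if_neg hl]
    rw [pvInner (g.length : Int) l hgl 0 [] p]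
    simp only []
    rw [ih (fun x hx => hne x (by simp [hx])) (fun x hx => hg x (by simp [hx]))]
    simp [pvAmps, PySem.List.enumerate_cons, List.foldl_append, List.append_assoc]

theorem pvSkipBlank_drop (ls : List (List Char)) :
    ls.drop (pvSkipBlank ls) = ls.dropWhile (fun l => l == []) := by
  induction ls with
  | nil => rfl
  | cons l rest ih =>
    by_cases h : l = [] <;> simp [pvSkipBlank, h, ih]

theorem pvRunLen_take (ls : List (List Char)) :
    ls.take (pvRunLen ls) = ls.takeWhile (fun l => l != []) := by
  induction ls with
  | nil => rfl
  | cons l rest ih =>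
    by_cases h : l = [] <;> simp [pvRunLen, h, ih]

theorem pvRunLen_drop (ls : List (List Char)) :
    ls.drop (pvRunLen ls) = ls.dropWhile (fun l => l != []) := by
  induction ls with
  | nil => rfl
  | cons l rest ih =>
    by_cases h : l = [] <;> simp [pvRunLen, h, ih]

-- ===== VERDICT (by name: the statement is the Claim_ definition above) =====
theorem parse_part_2_spec : Claim_equal_parse_part_2 := by
  intro s _ hpre
  unfold Pre_parse_part_2 at hpre
  unfold Spec_parse_part_2 parse_part_2 parse_part_2_alt
  rw [pvSkip]
  simp only [pvSkipBlank_drop, pvRunLen_take, pvRunLen_drop]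
  generalize hlines : PySem.Chars.splitOn (PySem.Str.strip s).toList ['\n'] = lines at hpre ⊢
  generalize hb : lines.dropWhile (fun l => l == []) = b at hpre ⊢
  generalize hls : b.takeWhile (fun l => l != []) = ls at hpre ⊢
  generalize hrs : b.dropWhile (fun l => l != []) = rs
  have hsplit : ls ++ rs = b := by rw [← hls, ← hrs]; exact List.takeWhile_append_dropWhile
  have hne : ∀ l ∈ ls, l ≠ [] := by
    intro l hl
    rw [← hls] at hl
    have := List.mem_takeWhile_imp hl
    simpa using this
  have hgood : ∀ l ∈ ls, ∀ c ∈ l, pvGood c := by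
    intro l hl c hc
    have h1 := (List.all_eq_true.mp hpre) l hl
    have h2 := (List.all_eq_true.mp h1) c hc
    simp only [Bool.or_eq_true, beq_iff_eq] at h2
    unfold pvGood
    rcases h2 with ((h | h) | h) | h
    · exact Or.inl h
    · exact Or.inr (Or.inl h)
    · exact Or.inr (Or.inr (Or.inl h))
    · exact Or.inr (Or.inr (Or.inr h))
  rw [← hsplit, pvGrid ls hne hgood rs [] [] none]
  simp only [List.nil_append, List.length_nil, Nat.cast_zero]
  rcases hrs2 : rs with _ | ⟨r, rs'⟩
  · simp [pvALoop, pvLast, pvAmps, pvExpand]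
  · have hr : r = [] := by
      have := List.head?_dropWhile_not (fun l => l != []) b
      rw [hrs, hrs2] at this; simpa using this
    subst hr
    have hlsne : ls.map pvExpand ≠ [] := by
      have hbne : b ≠ [] := by
        intro h0
        rw [← hsplit, hrs2] at h0
        exact absurd h0 (by simp)
      rcases hb2 : b with _ | ⟨x, xs⟩
      · exact absurd hb2 hbne
      · have hx : (x != []) = true := by
          have := List.head?_dropWhile_not (fun l => l == []) lines
          rw [hb, hb2] at this; simpa using this
        rw [← hls, hb2]
        simp [hx]
    show pvALoop ([] :: rs') (ls.map pvExpand) [] _ true = _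
    rw [pvALoop, if_pos rfl, if_pos hlsne]
    rw [pvMoves]
    simp [pvLast, pvAmps, pvExpand]
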